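-- pv_equiv track=rewrite | github.com/Bardicus-Kilgore/campaign-manager | extraction/03_parse_feats.py | infer_class
-- ===== SOURCE A (Python) =====
-- CLASS_NAMES = {
--     'ALCHEMIST', 'BARBARIAN', 'BARD', 'CHAMPION', 'CLERIC', 'DRUID',
--     'FIGHTER', 'GUNSLINGER', 'INVENTOR', 'INVESTIGATOR', 'MAGUS', 'MONK',
--     'ORACLE', 'PSYCHIC', 'RANGER', 'ROGUE', 'SORCERER', 'SUMMONER',
--     'SWASHBUCKLER', 'THAUMATURGE', 'WITCH', 'WIZARD',
-- }
--
-- ANCESTRY_NAMES = {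
--     'DWARF', 'ELF', 'GNOME', 'GOBLIN', 'HALFLING', 'HUMAN', 'LESHY',
--     'ORC', 'CATFOLK', 'KOBOLD', 'LIZARDFOLK', 'RATFOLK', 'SPRITE',
--     'TENGU', 'AUTOMATON', 'FETCHLING', 'FLESHWARP', 'GHORAN',
--     'GOLOMA', 'GRIPPLI', 'KITSUNE', 'POPPET', 'SHOONY', 'STRIX',
--     'VANARA', 'VISHKANYA', 'GENIEKIN', 'NEPHILIM', 'REFLECTION',
--     'AIUVARIN', 'DROMAAR',
-- }
--
-- def infer_class(traits_list):
--     """Pick the most relevant class/ancestry from the trait list."""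
--     for t in traits_list:
--         upper = t.upper()
--         if upper in CLASS_NAMES:
--             return upper.title()
--     for t in traits_list:
--         upper = t.upper()
--         if upper in ANCESTRY_NAMES:
--             return upper.title() + ' (ancestry)'
--     # Check for general/skill/archetype
--     uppers = {t.upper() for t in traits_list}
--     if 'ARCHETYPE' in uppers:
--         return 'Archetype'
--     if 'SKILL' in uppers:
--         return 'General/Skill'
--     if 'GENERAL' in uppers:
--         return 'General'
--     return ''
-- ===== SOURCE B (Python) =====
-- CLASS_NAMES = {
--     'ALCHEMIST', 'BARBARIAN', 'BARD', 'CHAMPION', 'CLERIC', 'DRUID',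
--     'FIGHTER', 'GUNSLINGER', 'INVENTOR', 'INVESTIGATOR', 'MAGUS', 'MONK',
--     'ORACLE', 'PSYCHIC', 'RANGER', 'ROGUE', 'SORCERER', 'SUMMONER',
--     'SWASHBUCKLER', 'THAUMATURGE', 'WITCH', 'WIZARD',
-- }
--
-- ANCESTRY_NAMES = {
--     'DWARF', 'ELF', 'GNOME', 'GOBLIN', 'HALFLING', 'HUMAN', 'LESHY',
--     'ORC', 'CATFOLK', 'KOBOLD', 'LIZARDFOLK', 'RATFOLK', 'SPRITE',
--     'TENGU', 'AUTOMATON', 'FETCHLING', 'FLESHWARP', 'GHORAN',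
--     'GOLOMA', 'GRIPPLI', 'KITSUNE', 'POPPET', 'SHOONY', 'STRIX',
--     'VANARA', 'VISHKANYA', 'GENIEKIN', 'NEPHILIM', 'REFLECTION',
--     'AIUVARIN', 'DROMAAR',
-- }
--
-- def infer_class(traits_list):
--     """Pick the most relevant class/ancestry from the trait list (single pass)."""
--     ancestry = None
--     has_archetype = has_skill = has_general = False
--     for t in traits_list:
--         upper = t.upper()
--         if upper in CLASS_NAMES:
--             return upper.title()  # a class anywhere wins; first one in list order
--         if ancestry is None and upper in ANCESTRY_NAMES:
--             ancestry = upper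
--         has_archetype = has_archetype or upper == 'ARCHETYPE'
--         has_skill = has_skill or upper == 'SKILL'
--         has_general = has_general or upper == 'GENERAL'
--     if ancestry is not None:
--         return ancestry.title() + ' (ancestry)'
--     if has_archetype:
--         return 'Archetype'
--     if has_skill:
--         return 'General/Skill'
--     if has_general:
--         return 'General'
--     return ''
-- ===== Notes on version B (the rewrite author's own statement) =====
-- stated objective: simpler
-- what changed: Replaces A's three separate passes (class scan, ancestry scan, set build + category checks) with one single loop that returns immediately on a class and otherwise accumulates the first ancestry and three category flags, deciding after the loop in fixed priority.
import Mathlib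
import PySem

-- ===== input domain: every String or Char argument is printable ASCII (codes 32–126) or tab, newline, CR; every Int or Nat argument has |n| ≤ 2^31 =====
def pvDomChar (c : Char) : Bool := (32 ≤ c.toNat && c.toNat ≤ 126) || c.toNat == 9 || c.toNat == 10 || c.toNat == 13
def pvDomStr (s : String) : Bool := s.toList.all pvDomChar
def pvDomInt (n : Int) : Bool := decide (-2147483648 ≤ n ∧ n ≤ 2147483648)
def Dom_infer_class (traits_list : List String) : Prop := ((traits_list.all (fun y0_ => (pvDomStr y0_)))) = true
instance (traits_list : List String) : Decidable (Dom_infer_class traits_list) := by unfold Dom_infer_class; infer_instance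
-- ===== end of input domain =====

-- B replaces A's three passes (class scan, ancestry scan, set build + category checks) by one
-- single loop with early return and accumulated state; objective: simpler.

-- ===== PORT A =====
def pvClassNames : List String :=
  ["ALCHEMIST", "BARBARIAN", "BARD", "CHAMPION", "CLERIC", "DRUID",
   "FIGHTER", "GUNSLINGER", "INVENTOR", "INVESTIGATOR", "MAGUS", "MONK",
   "ORACLE", "PSYCHIC", "RANGER", "ROGUE", "SORCERER", "SUMMONER",
   "SWASHBUCKLER", "THAUMATURGE", "WITCH", "WIZARD"]

def pvAncestryNames : List String :=
  ["DWARF", "ELF", "GNOME", "GOBLIN", "HALFLING", "HUMAN", "LESHY",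
   "ORC", "CATFOLK", "KOBOLD", "LIZARDFOLK", "RATFOLK", "SPRITE",
   "TENGU", "AUTOMATON", "FETCHLING", "FLESHWARP", "GHORAN",
   "GOLOMA", "GRIPPLI", "KITSUNE", "POPPET", "SHOONY", "STRIX",
   "VANARA", "VISHKANYA", "GENIEKIN", "NEPHILIM", "REFLECTION",
   "AIUVARIN", "DROMAAR"]

-- str.title(): hand-ported (PySem has no title); exact for ASCII strings, where Python's
-- "cased" characters are exactly the letters.
def pvTitleGo : Bool → List Char → List Char
  | _, [] => []
  | prev, c :: cs =>
    if PySem.Chars.isalpha c then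
      (if prev then PySem.Chars.lowerChar c else PySem.Chars.upperChar c) :: pvTitleGo true cs
    else c :: pvTitleGo false cs

def pvTitle (s : String) : String := String.ofList (pvTitleGo false s.toList)

-- first loop of A: first class trait, titled
def pvLoop1 : List String → Option String
  | [] => none
  | t :: rest =>
    let u := PySem.Str.upper t
    if pvClassNames.contains u then some (pvTitle u) else pvLoop1 rest

-- second loop of A: first ancestry trait, titled + ' (ancestry)'
def pvLoop2 : List String → Option String
  | [] => none
  | t :: rest =>
    let u := PySem.Str.upper t
    if pvAncestryNames.contains u then
      some (String.ofList (pvTitleGo false u.toList ++ " (ancestry)".toList))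
    else pvLoop2 rest

def infer_class (traits_list : List String) : String :=
  match pvLoop1 traits_list with
  | some r => r
  | none =>
    match pvLoop2 traits_list with
    | some r => r
    | none =>
      let uppers := PySem.Set.ofList (traits_list.map PySem.Str.upper)
      if PySem.Set.contains uppers "ARCHETYPE" then "Archetype"
      else if PySem.Set.contains uppers "SKILL" then "General/Skill"
      else if PySem.Set.contains uppers "GENERAL" then "General"
      else ""

-- ===== PORT B =====
def pvAltLoop : List String → Option String → Bool → Bool → Bool → String
  | [], anc, a, s, g =>
    match anc with
    | some u => String.ofList (pvTitleGo false u.toList ++ " (ancestry)".toList)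
    | none =>
      if a then "Archetype" else if s then "General/Skill" else if g then "General" else ""
  | t :: rest, anc, a, s, g =>
    let u := PySem.Str.upper t
    if pvClassNames.contains u then pvTitle u
    else
      pvAltLoop rest
        (if anc.isNone && pvAncestryNames.contains u then some u else anc)
        (a || u == "ARCHETYPE") (s || u == "SKILL") (g || u == "GENERAL")

def infer_class_alt (traits_list : List String) : String :=
  pvAltLoop traits_list none false false false

-- ===== PRECONDITION & SPEC =====
def Spec_infer_class (traits_list : List String) (out : String) : Prop := out = infer_class_alt traits_list
instance (traits_list : List String) (out : String) : Decidable (Spec_infer_class traits_list out) := by unfold Spec_infer_class; infer_instance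

-- ===== CLAIM (what is proved, stated in full; the proofs are below) =====
def Claim_equal_infer_class : Prop := ∀ (traits_list : List String), Dom_infer_class traits_list → Spec_infer_class traits_list (infer_class traits_list)

-- ===== LEMMAS AND PROOFS =====

-- membership in set(uppers) is membership in the mapped list
theorem pvSet_contains_eq (xs : List String) (x : String) :
    PySem.Set.contains (PySem.Set.ofList xs) x = xs.contains x := by
  simp [PySem.Set.contains, PySem.Set.mem_ofList]

-- the single pass equals A's three passes, for any carried state
set_option maxRecDepth 4096 in
theorem pvAltLoop_eq (xs : List String) (anc : Option String) (a s g : Bool) :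
    pvAltLoop xs anc a s g =
      match pvLoop1 xs with
      | some r => r
      | none =>
        match anc with
        | some u => String.ofList (pvTitleGo false u.toList ++ " (ancestry)".toList)
        | none =>
          match pvLoop2 xs with
          | some r => r
          | none =>
            if a || (xs.map PySem.Str.upper).contains "ARCHETYPE" then "Archetype"
            else if s || (xs.map PySem.Str.upper).contains "SKILL" then "General/Skill"
            else if g || (xs.map PySem.Str.upper).contains "GENERAL" then "General"
            else "" := by
  induction xs generalizing anc a s g with
  | nil => cases anc <;> simp [pvAltLoop, pvLoop1, pvLoop2]
  | cons t rest ih =>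
    by_cases hc : PySem.Str.upper t ∈ pvClassNames
    · simp [pvAltLoop, pvLoop1, hc]
    · by_cases ha : PySem.Str.upper t ∈ pvAncestryNames <;>
      cases anc <;>
      (simp only [pvAltLoop, pvLoop1, pvLoop2]
       rw [ih]
       simp [hc, ha, or_assoc, @eq_comm String "ARCHETYPE", @eq_comm String "SKILL", @eq_comm String "GENERAL"])

-- ===== VERDICT (by name: the statement is the Claim_ definition above) =====
theorem infer_class_spec : Claim_equal_infer_class := by
  intro xs _
  show infer_class xs = infer_class_alt xs
  rw [infer_class_alt, pvAltLoop_eq]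
  simp only [infer_class, pvSet_contains_eq, Bool.false_or]
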